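-- pv_equiv track=rewrite | github.com/robertdcurrier/dive_bar | analyze.py | dedup_ngrams
-- ===== SOURCE A (Python) =====
-- def dedup_ngrams(
--     phrases: dict[tuple[str, ...], set[str]],
-- ) -> dict[tuple[str, ...], set[str]]:
--     """Remove ngrams that are subsets of longer ones."""
--     sorted_keys = sorted(
--         phrases.keys(), key=len, reverse=True
--     )
--     kept: dict[tuple[str, ...], set[str]] = {}
--     for gram in sorted_keys:
--         gram_str = " ".join(gram)
--         is_sub = any(
--             gram_str in " ".join(k)
--             for k in kept
--             if len(k) > len(gram)
--         )
--         if not is_sub: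
--             kept[gram] = phrases[gram]
--     return kept
-- ===== SOURCE B (Python) =====
-- def dedup_ngrams(
--     phrases: dict[tuple[str, ...], set[str]],
-- ) -> dict[tuple[str, ...], set[str]]:
--     """Remove ngrams that are subsets of longer ones."""
--     order = sorted(phrases, key=len, reverse=True)
--     joined = [(len(g), " ".join(g)) for g in order]
--
--     def covered(n, s):
--         return any(s in t for m, t in joined if m > n)
--
--     return {g: phrases[g]
--             for g, (n, s) in zip(order, joined)
--             if not covered(n, s)}
-- ===== Notes on version B (the rewrite author's own statement) =====
-- stated objective: alternative
-- what changed: A filters sequentially, testing each gram against the joins of the already-KEPT longer grams recomputed on every probe; B precomputes every join once and does an independent, stateless per-gram test against ALL strictly longer grams (a dict comprehension), correct because substring containment is transitive, so a gram covered by a discarded longer gram is also covered by the kept gram that discarded it.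
import Mathlib
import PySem

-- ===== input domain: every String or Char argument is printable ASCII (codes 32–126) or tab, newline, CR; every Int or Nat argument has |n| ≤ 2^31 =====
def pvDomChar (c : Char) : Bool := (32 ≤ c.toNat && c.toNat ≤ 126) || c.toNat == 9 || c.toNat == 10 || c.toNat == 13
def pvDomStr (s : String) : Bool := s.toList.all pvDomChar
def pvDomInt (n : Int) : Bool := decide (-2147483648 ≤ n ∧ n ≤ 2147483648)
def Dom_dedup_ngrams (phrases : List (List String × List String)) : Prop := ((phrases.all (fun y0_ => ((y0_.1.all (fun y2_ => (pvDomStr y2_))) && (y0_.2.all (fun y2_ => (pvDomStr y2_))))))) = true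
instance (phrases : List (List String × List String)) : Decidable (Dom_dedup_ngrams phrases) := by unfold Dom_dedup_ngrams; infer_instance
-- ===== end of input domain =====

-- B replaces A's sequential filter against the already-kept longer joins (recomputed each probe)
-- by a stateless per-gram test against all strictly longer grams with every join precomputed once;
-- equivalent because substring containment is transitive (objective: alternative, same asymptotic cost).


-- ===== PORT A =====
def dedup_ngrams (phrases : List (List String × List String)) : List (List String × List String) :=
  let d := PySem.Dict.mk phrases
  let sorted_keys := PySem.List.sorted d.keys (fun k => k.length) true
  let kept := sorted_keys.foldl (fun kept gram =>
      let gram_str := PySem.Str.join " " gram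
      let is_sub := kept.keys.any (fun k =>
        decide (gram.length < k.length) && PySem.Str.isIn gram_str (PySem.Str.join " " k))
      if is_sub then kept else kept.insert gram (d.getD gram []))
    PySem.Dict.empty
  kept.items

-- ===== PORT B =====
def dedup_ngrams_alt (phrases : List (List String × List String)) : List (List String × List String) :=
  let d := PySem.Dict.mk phrases
  let order := PySem.List.sorted d.keys (fun k => k.length) true
  let joined := order.map (fun g => (g.length, PySem.Str.join " " g))
  let covered : Nat → String → Bool := fun n s =>
    joined.any (fun mt => decide (n < mt.1) && PySem.Str.isIn s mt.2)
  ((order.zip joined).foldl (fun kept gz =>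
      if covered gz.2.1 gz.2.2 then kept else kept.insert gz.1 (d.getD gz.1 []))
    PySem.Dict.empty).items

-- ===== PRECONDITION & SPEC =====
-- Pre_ excludes association lists with duplicate keys: they do not represent a Python dict
-- (dict() collapses them before A ever runs), so every real input satisfies Pre_.
def Pre_dedup_ngrams (phrases : List (List String × List String)) : Prop :=
  (phrases.map Prod.fst).Nodup
instance (phrases : List (List String × List String)) : Decidable (Pre_dedup_ngrams phrases) := by
  unfold Pre_dedup_ngrams; infer_instance
def pvWitness_dedup_ngrams : (List (List String × List String)) :=
  [(["a", "b"], ["x"]), (["a"], ["y"])]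
def Spec_dedup_ngrams (phrases : List (List String × List String)) (out : List (List String × List String)) : Prop := out = dedup_ngrams_alt phrases
instance (phrases : List (List String × List String)) (out : List (List String × List String)) : Decidable (Spec_dedup_ngrams phrases out) := by unfold Spec_dedup_ngrams; infer_instance

-- ===== CLAIM (what is proved, stated in full; the proofs are below) =====
def Claim_equal_dedup_ngrams : Prop := ∀ (phrases : List (List String × List String)), Dom_dedup_ngrams phrases → Pre_dedup_ngrams phrases → Spec_dedup_ngrams phrases (dedup_ngrams phrases)

-- ===== LEMMAS AND PROOFS =====

-- the join of a gram
def pvJn (g : List String) : String := PySem.Str.join " " g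

-- "k is strictly longer than g and g's join occurs inside k's join"
def pvHit (g k : List String) : Bool :=
  decide (g.length < k.length) && PySem.Str.isIn (pvJn g) (pvJn k)

-- B's keep decision, relative to the full key list L
def pvKeep (L : List (List String)) (g : List String) : Bool := !(L.any (pvHit g))

theorem pvHit_trans {g k k2 : List String} (h1 : pvHit g k = true) (h2 : pvHit k k2 = true) :
    pvHit g k2 = true := by
  simp only [pvHit, Bool.and_eq_true, decide_eq_true_eq, PySem.Str.isIn_iff_infix] at *
  exact ⟨Nat.lt_trans h1.1 h2.1, h1.2.trans h2.2⟩

-- strictly more elements of L are longer than k than are longer than a longer k2 ∈ L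
theorem pvCountP_lt {L : List (List String)} {k k2 : List String}
    (hmem : k2 ∈ L) (hlt : k.length < k2.length) :
    L.countP (fun x => decide (k2.length < x.length)) <
      L.countP (fun x => decide (k.length < x.length)) := by
  induction L with
  | nil => simp at hmem
  | cons a t ih =>
    rcases List.mem_cons.mp hmem with rfl | hmem'
    · simp only [List.countP_cons]
      have h1 : (decide (k2.length < k2.length)) = false := by simp
      have h2 : (decide (k.length < k2.length)) = true := by simpa using hlt
      have hle : t.countP (fun x => decide (k2.length < x.length)) ≤
          t.countP (fun x => decide (k.length < x.length)) := by
        apply List.countP_mono_left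
        intro x _ hx
        simp only [decide_eq_true_eq] at *
        omega
      simp only [h1, h2]
      simp
      omega
    · have := ih hmem'
      simp only [List.countP_cons]
      have hle : (if (decide (k2.length < a.length)) = true then 1 else 0) ≤
          (if (decide (k.length < a.length)) = true then 1 else 0) := by
        split_ifs with h1 h2 <;> simp_all <;> omega
      omega

-- escalate a hit to a hit on a KEPT element
theorem pvEscalate (L : List (List String)) (g : List String) :
    ∀ n k, L.countP (fun x => decide (k.length < x.length)) = n → k ∈ L → pvHit g k = true →
      ∃ k', k' ∈ L ∧ pvKeep L k' = true ∧ pvHit g k' = true := by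
  intro n
  induction n using Nat.strong_induction_on with
  | _ n ih =>
    intro k hn hk hhit
    by_cases hkeep : pvKeep L k = true
    · exact ⟨k, hk, hkeep, hhit⟩
    · have : L.any (pvHit k) = true := by
        simp only [pvKeep, Bool.not_eq_true'] at hkeep
        simpa using hkeep
      rcases List.any_eq_true.mp this with ⟨k2, hk2, hhit2⟩
      have hlt : k.length < k2.length := by
        simp only [pvHit, Bool.and_eq_true, decide_eq_true_eq] at hhit2
        exact hhit2.1
      have hdec := pvCountP_lt hk2 hlt
      rw [hn] at hdec
      exact ih _ hdec k2 rfl hk2 (pvHit_trans hhit hhit2)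

-- a strictly longer key occurs in the prefix P of the length-descending list L = P ++ gram :: R
theorem pvLonger_mem_prefix {P R : List (List String)} {gram k : List String}
    (hpw : (P ++ gram :: R).Pairwise (fun a b => b.length ≤ a.length))
    (hk : k ∈ P ++ gram :: R) (hlt : gram.length < k.length) : k ∈ P := by
  rcases List.mem_append.mp hk with h | h
  · exact h
  · rcases List.mem_cons.mp h with rfl | h'
    · omega
    · exfalso
      have hpw2 : (gram :: R).Pairwise (fun a b => b.length ≤ a.length) :=
        (List.pairwise_append.mp hpw).2.1
      have := (List.pairwise_cons.mp hpw2).1 k h'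
      omega

-- KEY: the check against kept longer keys equals the check against all longer keys
theorem pvAnyEq {P R : List (List String)} {gram : List String}
    (hpw : (P ++ gram :: R).Pairwise (fun a b => b.length ≤ a.length)) :
    (P.filter (pvKeep (P ++ gram :: R))).any (pvHit gram) = (P ++ gram :: R).any (pvHit gram) := by
  set L := P ++ gram :: R with hL
  apply Bool.eq_iff_iff.mpr
  simp only [List.any_eq_true]
  constructor
  · rintro ⟨k, hk, hhit⟩
    exact ⟨k, by
      have := List.mem_filter.mp hk
      exact List.mem_append.mpr (Or.inl this.1), hhit⟩
  · rintro ⟨k, hk, hhit⟩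
    rcases pvEscalate L gram _ k rfl hk hhit with ⟨k', hk', hkeep', hhit'⟩
    have hlt : gram.length < k'.length := by
      simp only [pvHit, Bool.and_eq_true, decide_eq_true_eq] at hhit'
      exact hhit'.1
    exact ⟨k', List.mem_filter.mpr ⟨pvLonger_mem_prefix hpw hk' hlt, hkeep'⟩, hhit'⟩

-- generic fold lemma: any step function whose condition agrees with the global "covered" test
-- produces the filter of L, paired with the values v
theorem pvFoldGen (L : List (List String)) (v : List String → List String)
    (c : PySem.Dict (List String) (List String) → List String → Bool)
    (hc : ∀ kept P gram R, L = P ++ gram :: R →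
        kept.items = (P.filter (pvKeep L)).map (fun g => (g, v g)) →
        c kept gram = L.any (pvHit gram))
    (hnd : L.Nodup) :
    ∀ R P kept, L = P ++ R → kept.items = (P.filter (pvKeep L)).map (fun g => (g, v g)) →
      (R.foldl (fun kept g => if c kept g then kept else kept.insert g (v g)) kept).items =
        (L.filter (pvKeep L)).map (fun g => (g, v g)) := by
  intro R
  induction R with
  | nil => intro P kept hLP hitems; simp only [List.foldl_nil]; rw [hitems, hLP]; simp
  | cons gram R' ih =>
    intro P kept hLP hitems
    simp only [List.foldl_cons]
    have hcond : c kept gram = L.any (pvHit gram) := hc kept P gram R' hLP hitems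
    by_cases hk : pvKeep L gram = true
    · have hcf : c kept gram = false := by
        rw [hcond]
        simp only [pvKeep, Bool.not_eq_true'] at hk
        exact hk
      rw [hcf]
      simp only [Bool.false_eq_true, if_false]
      have hnotmem : gram ∉ P := by
        subst hLP
        intro hmem
        exact (List.disjoint_of_nodup_append hnd) hmem (List.mem_cons_self)
      have hnotkeys : (PySem.Dict.contains kept gram) = false := by
        rw [PySem.Dict.contains_eq_decide_mem_keys]
        simp only [decide_eq_false_iff_not, PySem.Dict.keys, hitems, List.map_map]
        intro hmem
        rcases List.mem_map.mp hmem with ⟨g, hg, hgeq⟩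
        have : g = gram := by simpa using hgeq
        subst this
        exact hnotmem (List.mem_of_mem_filter hg)
      have hins : (kept.insert gram (v gram)).items = kept.items ++ [(gram, v gram)] :=
        PySem.Dict.items_insert_of_not_contains _ _ hnotkeys
      apply ih (P ++ [gram])
      · simpa using hLP
      · rw [hins, hitems, List.filter_append]
        simp [hk]
    · have hct : c kept gram = true := by
        rw [hcond]
        simp only [pvKeep, Bool.not_eq_true'] at hk
        simpa using hk
      rw [hct]
      simp only [if_true]
      apply ih (P ++ [gram])
      · simpa using hLP
      · rw [hitems, List.filter_append]
        simp [hk]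

theorem pvZip_self_map {α β : Type} (l : List α) (f : α → β) :
    l.zip (l.map f) = l.map (fun a => (a, f a)) := by
  induction l with
  | nil => rfl
  | cons a t ih => simp [List.zip_cons_cons, ih]

-- ===== VERDICT (by name: the statement is the Claim_ definition above) =====
theorem dedup_ngrams_spec : Claim_equal_dedup_ngrams := by
  unfold Claim_equal_dedup_ngrams Spec_dedup_ngrams
  intro phrases _ hpre
  set d := PySem.Dict.mk phrases with hd
  set L := PySem.List.sorted d.keys (fun k => k.length) true with hLdef
  have hnd : L.Nodup := by
    refine ((PySem.List.sorted_perm d.keys (fun k => k.length) true).nodup_iff).mpr ?_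
    rw [hd, PySem.Dict.keys_mk]
    exact hpre
  have hpw : L.Pairwise (fun a b => b.length ≤ a.length) :=
    PySem.List.sorted_pairwise_rev d.keys (fun k => k.length)
  have hempty : (PySem.Dict.empty : PySem.Dict (List String) (List String)).items = [] := rfl
  -- A's fold
  have hA : dedup_ngrams phrases =
      (L.foldl (fun kept g =>
        if (fun (kept : PySem.Dict (List String) (List String)) g => kept.keys.any (pvHit g)) kept g
        then kept else kept.insert g (d.getD g [])) PySem.Dict.empty).items := rfl
  have hAres := pvFoldGen L (fun g => d.getD g [])
      (fun kept g => kept.keys.any (pvHit g))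
      (by
        intro kept P gram R hL hitems
        show kept.keys.any (pvHit gram) = L.any (pvHit gram)
        have hkeys : kept.keys = P.filter (pvKeep L) := by
          show kept.items.map (fun x => x.1) = P.filter (pvKeep L)
          rw [hitems, List.map_map]
          exact List.map_id _
        rw [hkeys, hL]
        exact pvAnyEq (hL ▸ hpw))
      hnd L [] PySem.Dict.empty rfl (by simp [hempty])
  -- B's fold
  have hB : dedup_ngrams_alt phrases =
      ((L.zip (L.map (fun g => (g.length, PySem.Str.join " " g)))).foldl (fun kept gz =>
        if (L.map (fun g => (g.length, PySem.Str.join " " g))).any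
            (fun mt => decide (gz.2.1 < mt.1) && PySem.Str.isIn gz.2.2 mt.2)
        then kept else kept.insert gz.1 (d.getD gz.1 [])) PySem.Dict.empty).items := rfl
  rw [pvZip_self_map, List.foldl_map] at hB
  have hBres := pvFoldGen L (fun g => d.getD g [])
      (fun _ g => (L.map (fun g => (g.length, PySem.Str.join " " g))).any
          (fun mt => decide (g.length < mt.1) && PySem.Str.isIn (PySem.Str.join " " g) mt.2))
      (by
        intro kept P gram R hL hitems
        show (L.map (fun g => (g.length, PySem.Str.join " " g))).any
            (fun mt => decide (gram.length < mt.1) && PySem.Str.isIn (PySem.Str.join " " gram) mt.2) =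
          L.any (pvHit gram)
        rw [List.any_map]
        rfl)
      hnd L [] PySem.Dict.empty rfl (by simp [hempty])
  rw [hA, hAres, hB, hBres]
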